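-- pv_equiv track=rewrite | github.com/obinnaofomah/Python_BE | assessment_2.py | list_converter
-- ===== SOURCE A (Python) =====
-- def list_converter(scrambled_list, target_word):
--     """
--     Question 1
--     Write a function that converts a scattered list to become a word
--     For example
--
--     word = humble
--     list = ["h","l","m","u","b","e"]
--
--     return
--     -----
--     String
--
--     """
--
--     new_word = ""
--     scrambled_str = "".join(scrambled_list).lower()
--
--     for element in target_word.lower():
--         if element in scrambled_str:
--             new_word += element
--         else:
--             return "word not found"
--
--     return new_word
-- ===== SOURCE B (Python) =====
-- def list_converter(scrambled_list, target_word):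
--     # sort-then-merge: sort the distinct chars of both sides and check
--     # containment with a single two-pointer scan (no membership tests).
--     t = sorted(set(target_word.lower()))
--     s = sorted(set("".join(scrambled_list).lower()))
--     i = 0
--     for c in t:
--         while i < len(s) and s[i] < c:
--             i += 1
--         if i == len(s) or s[i] != c:
--             return "word not found"
--     return target_word.lower()
-- ===== Notes on version B (the rewrite author's own statement) =====
-- stated objective: alternative
-- what changed: Replaced the per-character membership loop that rebuilds the word with a sort-then-merge algorithm: sort the distinct lowered chars of target and scrambled input and verify containment by a single two-pointer scan, returning target_word.lower() directly.
import Mathlib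
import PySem

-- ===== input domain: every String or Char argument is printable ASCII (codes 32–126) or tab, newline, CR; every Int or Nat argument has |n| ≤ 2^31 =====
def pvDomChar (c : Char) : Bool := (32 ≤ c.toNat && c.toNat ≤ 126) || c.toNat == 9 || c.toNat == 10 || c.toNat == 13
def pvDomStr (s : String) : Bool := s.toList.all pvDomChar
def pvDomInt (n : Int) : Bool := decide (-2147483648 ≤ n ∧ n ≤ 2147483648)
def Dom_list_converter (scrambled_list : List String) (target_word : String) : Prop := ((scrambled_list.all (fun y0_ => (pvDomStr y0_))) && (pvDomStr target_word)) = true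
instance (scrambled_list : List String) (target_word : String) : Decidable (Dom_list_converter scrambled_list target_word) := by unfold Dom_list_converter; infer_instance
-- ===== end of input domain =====

-- B replaces A's per-character membership loop by sorting the distinct lowered chars of both sides and checking containment with a single two-pointer merge scan (alternative algorithm, same behaviour).


-- ===== PORT A =====
-- the 'for element in target_word.lower()' loop with accumulator new_word and the early return
def lcLoopA (scrambled_str : List Char) : List Char → List Char → String
  | [], new_word => String.ofList new_word
  | element :: rest, new_word =>
      if scrambled_str.contains element then lcLoopA scrambled_str rest (new_word ++ [element])
      else "word not found"

def list_converter (scrambled_list : List String) (target_word : String) : String :=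
  let scrambled_str := PySem.Chars.lower (PySem.Str.join "" scrambled_list).toList
  lcLoopA scrambled_str (PySem.Chars.lower target_word.toList) []

-- ===== PORT B =====
-- the inner 'while i < len(s) and s[i] < c: i += 1' — advance the pointer past chars below c
def lcSkip (c : Char) : List Char → List Char
  | [] => []
  | d :: ds => if d < c then lcSkip c ds else d :: ds

-- the 'for c in t' two-pointer scan: skip, then compare the current char of s with c
def lcScan : List Char → List Char → Bool
  | [], _ => true
  | c :: ct, s =>
      match lcSkip c s with
      | [] => false
      | d :: ds => if d ≠ c then false else lcScan ct (d :: ds)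

def list_converter_alt (scrambled_list : List String) (target_word : String) : String :=
  let t := PySem.List.sorted (PySem.Set.ofList (PySem.Chars.lower target_word.toList)) (fun x => x) false
  let s := PySem.List.sorted (PySem.Set.ofList (PySem.Chars.lower (PySem.Str.join "" scrambled_list).toList)) (fun x => x) false
  if lcScan t s then String.ofList (PySem.Chars.lower target_word.toList)
  else "word not found"

-- ===== PRECONDITION & SPEC =====
def Spec_list_converter (scrambled_list : List String) (target_word : String) (out : String) : Prop := out = list_converter_alt scrambled_list target_word
instance (scrambled_list : List String) (target_word : String) (out : String) : Decidable (Spec_list_converter scrambled_list target_word out) := by unfold Spec_list_converter; infer_instance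

-- ===== CLAIM (what is proved, stated in full; the proofs are below) =====
def Claim_equal_list_converter : Prop := ∀ (scrambled_list : List String) (target_word : String), Dom_list_converter scrambled_list target_word → Spec_list_converter scrambled_list target_word (list_converter scrambled_list target_word)

-- ===== LEMMAS AND PROOFS =====
theorem lcLoopA_eq (scr : List Char) : ∀ (cs acc : List Char),
    lcLoopA scr cs acc = if cs.all scr.contains then String.ofList (acc ++ cs) else "word not found" := by
  intro cs
  induction cs with
  | nil => intro acc; simp [lcLoopA]
  | cons c rest ih =>
      intro acc
      simp only [lcLoopA, List.all_cons]
      by_cases h : c ∈ scr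
      · simp [h, ih]
      · simp [h]

-- elements dropped by lcSkip are all < c, so membership of any e with ¬ e < c is unchanged
theorem mem_lcSkip_of_not_lt (c e : Char) (he : ¬ e < c) :
    ∀ s : List Char, (e ∈ lcSkip c s ↔ e ∈ s) := by
  intro s
  induction s with
  | nil => simp [lcSkip]
  | cons d ds ih =>
      by_cases h : d < c
      · simp only [lcSkip, if_pos h, List.mem_cons]
        constructor
        · intro hm; exact Or.inr (ih.mp hm)
        · rintro (rfl | hm)
          · exact absurd h he
          · exact ih.mpr hm
      · simp [lcSkip, h]

-- on a strictly sorted s, lcSkip returns [] or a strictly sorted list whose head is not < c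
theorem lcSkip_cases (c : Char) : ∀ s : List Char, s.Pairwise (· < ·) →
    lcSkip c s = [] ∨ ∃ d ds, lcSkip c s = d :: ds ∧ ¬ d < c ∧ (d :: ds).Pairwise (· < ·) := by
  intro s
  induction s with
  | nil => intro _; exact Or.inl rfl
  | cons d ds ih =>
      intro hp
      by_cases h : d < c
      · simpa [lcSkip, h] using ih (List.Pairwise.of_cons hp)
      · exact Or.inr ⟨d, ds, by simp [lcSkip, h], h, hp⟩

theorem lcScan_eq : ∀ t s : List Char, t.Pairwise (· < ·) → s.Pairwise (· < ·) →
    lcScan t s = t.all s.contains := by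
  intro t
  induction t with
  | nil => intro s _ _; simp [lcScan]
  | cons c ct ih =>
      intro s ht hs
      have hct : ct.Pairwise (· < ·) := List.Pairwise.of_cons ht
      have hcct : ∀ e ∈ ct, c < e := fun e he => List.rel_of_pairwise_cons ht he
      have hcc : ¬ c < c := lt_irrefl c
      rcases lcSkip_cases c s hs with h | ⟨d, ds, h, hdc, hds⟩
      · have hcs : c ∉ s := fun hm => by
          have := (mem_lcSkip_of_not_lt c c hcc s).mpr hm
          rw [h] at this; exact absurd this (List.not_mem_nil)
        simp [lcScan, h, hcs]
      · by_cases hd : d = c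
        · rw [hd] at h hds
          have hmem : c ∈ s := (mem_lcSkip_of_not_lt c c hcc s).mp (h ▸ List.mem_cons_self)
          have hrest : ct.all (c :: ds).contains = ct.all s.contains := by
            rw [Bool.eq_iff_iff]
            simp only [List.all_eq_true, List.contains_eq_mem, decide_eq_true_eq]
            refine forall_congr' fun e => forall_congr' fun hect => ?_
            have hne : ¬ e < c := fun hlt => absurd (lt_trans (hcct e hect) hlt) (lt_irrefl c)
            have := mem_lcSkip_of_not_lt c e hne s
            rw [h] at this
            exact this
          simp [lcScan, h, ih (c :: ds) hct hds, hrest, hmem]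
        · have hcd : c < d := lt_of_le_of_ne (not_lt.mp hdc) (Ne.symm hd)
          have hcs : c ∉ s := fun hm => by
            have hmm := (mem_lcSkip_of_not_lt c c hcc s).mpr hm
            rw [h] at hmm
            rcases List.mem_cons.mp hmm with rfl | hmm'
            · exact hd rfl
            · exact absurd (lt_trans hcd (List.rel_of_pairwise_cons hds hmm')) (lt_irrefl c)
          simp [lcScan, h, hd, hcs]

-- all-membership is invariant under replacing both lists by their sorted dedups
theorem all_sorted_ofList (L M : List Char) :
    (PySem.List.sorted (PySem.Set.ofList L) (fun x => x) false).all
      (PySem.List.sorted (PySem.Set.ofList M) (fun x => x) false).contains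
    = L.all M.contains := by
  rw [Bool.eq_iff_iff]
  simp [List.all_eq_true, PySem.List.mem_sorted, PySem.Set.mem_ofList]

-- ===== VERDICT (by name: the statement is the Claim_ definition above) =====
theorem list_converter_spec : Claim_equal_list_converter := by
  intro scrambled_list target_word _
  unfold Spec_list_converter list_converter list_converter_alt
  simp only [lcLoopA_eq]
  rw [lcScan_eq _ _ (PySem.List.sorted_ofList_pairwise_lt _) (PySem.List.sorted_ofList_pairwise_lt _),
      all_sorted_ofList]
  simp
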